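-- pv_equiv track=rewrite | github.com/madeso/bookshelf | split.py | join_sections
-- ===== SOURCE A (Python) =====
-- from typing import List
--
-- TEXT_DEPTH = 999
--
-- def get_section_depth(section: List[str]) -> int:
--     first = section[0] if section else ''
--     ret = first.split(' ')[0].count('#')
--     return ret if ret > 0 else TEXT_DEPTH
--
-- def join_sections(sections: List[List[str]], depth: int) -> List[List[str]]:
--     joined = []
--     section = []
--     for s in sections:
--         if get_section_depth(s) == depth:
--             if section:
--                 joined.append(section)
--                 section = []
--         section.extend(s)
--     if section:
--         joined.append(section)
--     return joined
-- ===== SOURCE B (Python) =====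
-- from typing import List
--
-- TEXT_DEPTH = 999
--
-- def get_section_depth(section: List[str]) -> int:
--     first = section[0] if section else ''
--     ret = first.split(' ')[0].count('#')
--     return ret if ret > 0 else TEXT_DEPTH
--
-- def join_sections(sections: List[List[str]], depth: int) -> List[List[str]]:
--     # Boundary scan: repeatedly locate the end of the next group by index
--     # (a matching-depth header once a nonempty section has been seen),
--     # then materialise that whole group at once by slicing and flattening.
--     out = []
--     rest = sections
--     while rest:
--         seen = bool(rest[0])
--         end = 1
--         while end < len(rest) and not (seen and get_section_depth(rest[end]) == depth):
--             seen = seen or bool(rest[end])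
--             end += 1
--         if seen:
--             out.append([line for sub in rest[:end] for line in sub])
--         rest = rest[end:]
--     return out
-- ===== Notes on version B (the rewrite author's own statement) =====
-- stated objective: alternative
-- what changed: B replaces A's single pass with a running line-buffer and flush-on-header by a boundary scan: an outer loop per group whose inner scan first locates the next group boundary by index (matching-depth header after a nonempty section has been seen), then materialises the whole group at once by slicing and flattening; no incremental buffer is maintained.
import Mathlib
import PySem

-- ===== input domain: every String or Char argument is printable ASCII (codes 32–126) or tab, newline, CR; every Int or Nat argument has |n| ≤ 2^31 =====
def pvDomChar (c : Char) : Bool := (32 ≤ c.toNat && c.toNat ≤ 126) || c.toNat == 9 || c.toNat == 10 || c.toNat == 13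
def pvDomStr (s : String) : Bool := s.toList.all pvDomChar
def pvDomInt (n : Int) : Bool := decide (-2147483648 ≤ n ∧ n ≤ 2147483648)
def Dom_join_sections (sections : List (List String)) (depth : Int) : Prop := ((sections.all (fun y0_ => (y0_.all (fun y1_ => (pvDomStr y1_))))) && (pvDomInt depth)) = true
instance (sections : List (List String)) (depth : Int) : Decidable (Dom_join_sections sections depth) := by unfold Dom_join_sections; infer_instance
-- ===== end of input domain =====

-- B replaces A's running buffer-and-flush loop by a boundary scan: it locates the end
-- of each group first, then materialises the group in one slice+flatten; alternative
-- decomposition, same cost.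

-- ===== PORT A =====
-- helper shared by both Pythons (same module)
def get_section_depth (sec : List String) : Int :=
  let first := match sec with | [] => "" | f :: _ => f
  -- first.split(' ')[0]: split on a nonempty separator never yields [], so [0] = headD ""
  let ret : Int := (PySem.Str.count (((PySem.Str.split? first " ").getD []).headD "") "#" : Int)
  if ret > 0 then ret else 999

def joinStepA (depth : Int) (acc : List (List String) × List String) (s : List String) :
    List (List String) × List String :=
  let acc := if get_section_depth s = depth then
      (if acc.2 ≠ [] then (acc.1 ++ [acc.2], ([] : List String)) else acc)
    else acc
  (acc.1, acc.2 ++ s)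

def join_sections (sections : List (List String)) (depth : Int) : List (List String) :=
  let st := sections.foldl (joinStepA depth) ([], [])
  if st.2 ≠ [] then st.1 ++ [st.2] else st.1

-- ===== PORT B =====
-- inner scan (B's `while end < len(rest) and not (seen and …)`): walks the tail,
-- returning the final seen flag, the sections of the current group, and the remainder
def splitGroup (depth : Int) (seen : Bool) :
    List (List String) → Bool × List (List String) × List (List String)
  | [] => (seen, [], [])
  | s :: rest =>
    if seen = true ∧ get_section_depth s = depth then (seen, [], s :: rest)
    else
      let t := splitGroup depth (seen || !s.isEmpty) rest
      (t.1, s :: t.2.1, t.2.2)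

lemma splitGroup_len (depth : Int) (seen : Bool) (l : List (List String)) :
    (splitGroup depth seen l).2.2.length ≤ l.length := by
  induction l generalizing seen with
  | nil => simp [splitGroup]
  | cons s rest ih =>
    simp only [splitGroup]
    split
    · simp
    · exact le_trans (ih _) (Nat.le_succ _)

-- outer loop (B's `while rest:`), one iteration per group
def joinGo (depth : Int) : List (List String) → List (List String)
  | [] => []
  | s :: rest =>
    let t := splitGroup depth (!s.isEmpty) rest
    (if t.1 then [(s :: t.2.1).flatten] else []) ++ joinGo depth t.2.2
termination_by l => l.length
decreasing_by
  exact Nat.lt_succ_of_le (splitGroup_len depth (!s.isEmpty) rest)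

def join_sections_alt (sections : List (List String)) (depth : Int) : List (List String) :=
  joinGo depth sections

-- ===== PRECONDITION & SPEC =====
def Spec_join_sections (sections : List (List String)) (depth : Int) (out : List (List String)) : Prop := out = join_sections_alt sections depth
instance (sections : List (List String)) (depth : Int) (out : List (List String)) : Decidable (Spec_join_sections sections depth out) := by unfold Spec_join_sections; infer_instance

-- ===== CLAIM (what is proved, stated in full; the proofs are below) =====
def Claim_equal_join_sections : Prop := ∀ (sections : List (List String)) (depth : Int), Dom_join_sections sections depth → Spec_join_sections sections depth (join_sections sections depth)

-- ===== LEMMAS AND PROOFS =====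
-- finishA st: A's final flush
def finishA (st : List (List String) × List String) : List (List String) :=
  if st.2 ≠ [] then st.1 ++ [st.2] else st.1

lemma foldl_stepA_acc (depth : Int) (l : List (List String))
    (j : List (List String)) (buf : List String) :
    l.foldl (joinStepA depth) (j, buf) =
      (j ++ (l.foldl (joinStepA depth) ([], buf)).1,
       (l.foldl (joinStepA depth) ([], buf)).2) := by
  induction l generalizing j buf with
  | nil => simp
  | cons s rest ih =>
    simp only [List.foldl_cons]
    rw [ih, ih ((joinStepA depth ([], buf) s).1)]
    unfold joinStepA
    by_cases hd : get_section_depth s = depth <;> by_cases hb : buf = [] <;>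
      simp [hd, hb]

-- the bridge: running A from a bare buffer equals B's split of the tail,
-- provided seen tracks buffer-nonemptiness
theorem scan_eq (depth : Int) (l : List (List String)) :
    ∀ (buf : List String) (seen : Bool), seen = decide (buf ≠ []) →
    finishA (l.foldl (joinStepA depth) ([], buf)) =
      (let t := splitGroup depth seen l;
       (if t.1 then [buf ++ t.2.1.flatten] else []) ++ joinGo depth t.2.2) := by
  have ih : ∀ l' : List (List String), l'.length < l.length →
      ∀ (buf : List String) (seen : Bool), seen = decide (buf ≠ []) →
      finishA (l'.foldl (joinStepA depth) ([], buf)) =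
        (let t := splitGroup depth seen l';
         (if t.1 then [buf ++ t.2.1.flatten] else []) ++ joinGo depth t.2.2) :=
    fun l' _ => scan_eq depth l'
  intro buf seen hseen
  cases l with
  | nil => cases buf <;> simp_all [splitGroup, joinGo, finishA]
  | cons s rest =>
    by_cases hd : get_section_depth s = depth
    · by_cases hb : buf = []
      · -- no flush (empty buffer); seen = false so no break either
        subst hb
        have hseen' : seen = false := by simpa using hseen
        subst hseen'
        have e1 : (s :: rest).foldl (joinStepA depth) ([], []) =
            rest.foldl (joinStepA depth) ([], s) := by
          simp [joinStepA]
        have e2 : splitGroup depth false (s :: rest) =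
            ((splitGroup depth (!s.isEmpty) rest).1,
             s :: (splitGroup depth (!s.isEmpty) rest).2.1,
             (splitGroup depth (!s.isEmpty) rest).2.2) := by
          simp [splitGroup]
        rw [e1, e2, ih rest (by simp) s (!s.isEmpty) (by cases s <;> simp)]
        simp
      · -- flush: A appends buf, B closes the group here
        have hseen' : seen = true := by simp [hseen, hb]
        subst hseen'
        have e1 : (s :: rest).foldl (joinStepA depth) ([], buf) =
            rest.foldl (joinStepA depth) ([buf], s) := by
          simp [joinStepA, hd, hb]
        have e2 : splitGroup depth true (s :: rest) = (true, [], s :: rest) := by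
          simp [splitGroup, hd]
        have e3 : ∀ st : List (List String) × List String,
            finishA ([buf] ++ st.1, st.2) = [buf] ++ finishA st := by
          intro st; unfold finishA; split <;> simp
        rw [e1, e2, foldl_stepA_acc, e3,
            ih rest (by simp) s (!s.isEmpty) (by cases s <;> simp)]
        simp [joinGo]
    · -- no depth match: absorb s into the buffer / group
      have e1 : (s :: rest).foldl (joinStepA depth) ([], buf) =
          rest.foldl (joinStepA depth) ([], buf ++ s) := by
        simp [joinStepA, hd]
      have e2 : splitGroup depth seen (s :: rest) =
          ((splitGroup depth (seen || !s.isEmpty) rest).1,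
           s :: (splitGroup depth (seen || !s.isEmpty) rest).2.1,
           (splitGroup depth (seen || !s.isEmpty) rest).2.2) := by
        simp [splitGroup, hd]
      rw [e1, e2, ih rest (by simp) (buf ++ s) (seen || !s.isEmpty)
          (by cases buf <;> cases s <;> simp_all)]
      simp
termination_by l.length

-- ===== VERDICT (by name: the statement is the Claim_ definition above) =====
theorem join_sections_spec : Claim_equal_join_sections := by
  intro sections depth _
  unfold Spec_join_sections join_sections join_sections_alt
  cases sections with
  | nil => simp [joinGo]
  | cons s rest =>
    have h0 : (s :: rest).foldl (joinStepA depth) ([], []) =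
        rest.foldl (joinStepA depth) ([], s) := by
      simp only [List.foldl_cons, joinStepA]
      split <;> simp
    show finishA ((s :: rest).foldl (joinStepA depth) ([], [])) = _
    rw [h0, scan_eq depth rest s (!s.isEmpty) (by cases s <;> simp)]
    simp [joinGo]
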